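-- pv_equiv track=rewrite | github.com/racewinner/dream_tool | python-services/routes/solar_analysis_api.py | _map_photos_to_components
-- ===== SOURCE A (Python) =====
-- from typing import Dict, Any, List, Optional
--
-- def _map_photos_to_components(attachments: List[Dict[str, Any]], submission_data: Dict[str, Any]) -> Dict[str, Dict[str, Any]]:
--     """Map photo filenames to component types"""
--     component_mapping = {
--         "solar_panels_overview": "solar_panel",
--         "solar_panels_closeup": "solar_panel",
--         "battery_bank_complete": "battery",
--         "battery_labels": "battery",
--         "inverter_complete": "inverter",
--         "inverter_label": "inverter",
--         "mppt_controller": "mppt",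
--         "mppt_label": "mppt"
--     }
--
--     photo_mapping = {}
--     for field_name, component_type in component_mapping.items():
--         filename = submission_data.get(field_name)
--         if filename:
--             attachment = next(
--                 (a for a in attachments if a.get("filename") == filename),
--                 None
--             )
--             if attachment:
--                 photo_mapping[field_name] = {
--                     "component_type": component_type,
--                     "download_url": attachment.get("download_url") or attachment.get("download_large_url"),
--                     "filename": filename
--                 }
--
--     return photo_mapping
-- ===== SOURCE B (Python) =====
-- def _map_photos_to_components(attachments, submission_data):
--     """Map photo filenames to component types (attachment-driven single sweep)."""
--     component_mapping = {
--         "solar_panels_overview": "solar_panel",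
--         "solar_panels_closeup": "solar_panel",
--         "battery_bank_complete": "battery",
--         "battery_labels": "battery",
--         "inverter_complete": "inverter",
--         "inverter_label": "inverter",
--         "mppt_controller": "mppt",
--         "mppt_label": "mppt"
--     }
--
--     # Sweep the attachments ONCE in order; the first attachment whose filename a
--     # still-unclaimed mapped field requests claims that field.
--     found = {}
--     for a in attachments:
--         fn = a.get("filename")
--         for field in component_mapping:
--             if field not in found and fn and submission_data.get(field) == fn:
--                 found[field] = a
--
--     # Assemble the result in component_mapping order from the claimed fields.
--     return {
--         field: {
--             "component_type": component_type,
--             "download_url": found[field].get("download_url") or found[field].get("download_large_url"),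
--             "filename": submission_data[field],
--         }
--         for field, component_type in component_mapping.items()
--         if field in found
--     }
-- ===== Notes on version B (the rewrite author's own statement) =====
-- stated objective: alternative
-- what changed: B inverts the traversal: instead of scanning the attachment list once per mapped field (next(...)), it sweeps the attachments once in order, letting each attachment claim every still-unclaimed field that requests its filename, then assembles the result dict in mapping order from the claimed fields.
import Mathlib
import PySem

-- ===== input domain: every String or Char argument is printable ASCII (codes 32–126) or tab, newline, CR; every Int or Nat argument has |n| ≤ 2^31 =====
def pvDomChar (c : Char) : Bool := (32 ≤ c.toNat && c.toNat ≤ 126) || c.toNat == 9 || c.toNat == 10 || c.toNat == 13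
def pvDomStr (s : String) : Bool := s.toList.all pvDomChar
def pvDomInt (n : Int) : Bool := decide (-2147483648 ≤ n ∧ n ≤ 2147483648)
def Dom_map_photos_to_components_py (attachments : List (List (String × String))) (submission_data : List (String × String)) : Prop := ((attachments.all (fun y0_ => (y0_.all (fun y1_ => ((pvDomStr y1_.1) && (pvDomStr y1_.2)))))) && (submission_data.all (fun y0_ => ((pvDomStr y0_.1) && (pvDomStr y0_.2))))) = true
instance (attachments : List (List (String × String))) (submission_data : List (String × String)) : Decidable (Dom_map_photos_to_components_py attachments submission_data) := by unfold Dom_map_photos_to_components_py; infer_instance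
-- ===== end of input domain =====

-- B inverts the traversal: one ordered sweep over attachments that lets each attachment claim
-- still-unclaimed fields, then an assembly pass in mapping order (alternative decomposition, same cost).

-- ===== PORT A =====
-- the fixed component_mapping literal (items in Python's insertion order)
def pvFields : List (String × String) :=
  [("solar_panels_overview", "solar_panel"),
   ("solar_panels_closeup", "solar_panel"),
   ("battery_bank_complete", "battery"),
   ("battery_labels", "battery"),
   ("inverter_complete", "inverter"),
   ("inverter_label", "inverter"),
   ("mppt_controller", "mppt"),
   ("mppt_label", "mppt")]

-- attachment.get("download_url") or attachment.get("download_large_url")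
-- (the .getD "" defaults are unreachable under Pre_: there Python would return None, outside the String type)
def pvUrl (a : List (String × String)) : String :=
  match (PySem.Dict.mk a).get? "download_url" with
  | some s => if s = "" then ((PySem.Dict.mk a).get? "download_large_url").getD "" else s
  | none => ((PySem.Dict.mk a).get? "download_large_url").getD ""

def map_photos_to_components_py (attachments : List (List (String × String))) (submission_data : List (String × String)) : List (String × List (String × String)) :=
  (pvFields.foldl (fun (acc : PySem.Dict String (List (String × String))) (p : String × String) =>
      match (PySem.Dict.mk submission_data).get? p.1 with
      | none => acc
      | some f =>
        if f = "" then acc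
        else
          -- next((a for a in attachments if a.get("filename") == filename), None)
          match attachments.find? (fun a => (PySem.Dict.mk a).get? "filename" == some f) with
          | none => acc
          | some a => acc.insert p.1 [("component_type", p.2), ("download_url", pvUrl a), ("filename", f)])
    (PySem.Dict.mk [])).items

-- ===== PORT B =====
def map_photos_to_components_py_alt (attachments : List (List (String × String))) (submission_data : List (String × String)) : List (String × List (String × String)) :=
  -- one ordered sweep: each attachment claims every still-unclaimed field requesting its filename
  let found : PySem.Dict String (List (String × String)) :=
    attachments.foldl (fun found a =>
      pvFields.foldl (fun found p =>
        if found.contains p.1 then found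
        else
          match (PySem.Dict.mk a).get? "filename" with
          | none => found        -- fn falsy (None)
          | some fn =>
            if fn = "" then found  -- fn falsy ("")
            else if (PySem.Dict.mk submission_data).get? p.1 == some fn then found.insert p.1 a
            else found) found)
      (PySem.Dict.mk [])
  -- assembly comprehension in component_mapping order; submission_data[field] cannot miss when
  -- field ∈ found, so the .getD "" default is unreachable
  pvFields.filterMap (fun p =>
    match found.get? p.1 with
    | none => none
    | some a =>
      some (p.1, [("component_type", p.2), ("download_url", pvUrl a),
                  ("filename", ((PySem.Dict.mk submission_data).get? p.1).getD "")]))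

-- ===== PRECONDITION & SPEC =====
-- does the attachment carry a truthy download_url, or a download_large_url key at all?
def pvGoodUrl (a : List (String × String)) : Bool :=
  (match (PySem.Dict.mk a).get? "download_url" with
   | some s => !(s == "")
   | none => false) || ((PySem.Dict.mk a).get? "download_large_url").isSome
-- Pre_ excludes exactly the inputs on which A's returned dict contains None (not a str) as a
-- "download_url" value — unrepresentable in the declared String-valued output type (B returns the
-- identical dict-with-None there): some mapped field requests a filename whose first matching
-- attachment has neither a truthy "download_url" nor a "download_large_url" key.
def Pre_map_photos_to_components_py (attachments : List (List (String × String))) (submission_data : List (String × String)) : Prop :=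
  pvFields.all (fun p =>
    match (PySem.Dict.mk submission_data).get? p.1 with
    | none => true
    | some f =>
      if f = "" then true
      else
        match attachments.find? (fun a => (PySem.Dict.mk a).get? "filename" == some f) with
        | none => true
        | some a => pvGoodUrl a) = true
instance (attachments : List (List (String × String))) (submission_data : List (String × String)) : Decidable (Pre_map_photos_to_components_py attachments submission_data) := by unfold Pre_map_photos_to_components_py; infer_instance

def pvWitness_map_photos_to_components_py : (List (List (String × String))) × (List (String × String)) :=
  ([[("filename", "p.jpg"), ("download_url", "u")], [("filename", "q.jpg"), ("download_large_url", "v")]],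
   [("solar_panels_overview", "p.jpg"), ("battery_labels", "q.jpg")])

def Spec_map_photos_to_components_py (attachments : List (List (String × String))) (submission_data : List (String × String)) (out : List (String × List (String × String))) : Prop := out = map_photos_to_components_py_alt attachments submission_data
instance (attachments : List (List (String × String))) (submission_data : List (String × String)) (out : List (String × List (String × String))) : Decidable (Spec_map_photos_to_components_py attachments submission_data out) := by unfold Spec_map_photos_to_components_py; infer_instance

-- ===== CLAIM =====
def Claim_equal_map_photos_to_components_py : Prop := ∀ (attachments : List (List (String × String))) (submission_data : List (String × String)), Dom_map_photos_to_components_py attachments submission_data → Pre_map_photos_to_components_py attachments submission_data → Spec_map_photos_to_components_py attachments submission_data (map_photos_to_components_py attachments submission_data)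

-- ===== LEMMAS AND PROOFS =====

-- per-field content of A's result, as an optional entry
def pvEntryA (attachments : List (List (String × String))) (submission_data : List (String × String)) (p : String × String) : Option (List (String × String)) :=
  match (PySem.Dict.mk submission_data).get? p.1 with
  | none => none
  | some f =>
    if f = "" then none
    else
      match attachments.find? (fun a => (PySem.Dict.mk a).get? "filename" == some f) with
      | none => none
      | some a => some [("component_type", p.2), ("download_url", pvUrl a), ("filename", f)]

-- does attachment a's filename match what submission_data requests at field k?
def pvMatch (sub a : List (String × String)) (k : String) : Bool :=
  match (PySem.Dict.mk a).get? "filename" with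
  | none => false
  | some fn => !(fn == "") && ((PySem.Dict.mk sub).get? k == some fn)

-- optional insert of a per-field entry (named so the fold steps unify syntactically)
def pvOptIns {ν : Type} (g : (String × String) → Option ν)
    (acc : PySem.Dict String ν) (p : String × String) : PySem.Dict String ν :=
  match g p with
  | none => acc
  | some v => acc.insert p.1 v

-- A's conditional-insert fold over fresh distinct keys yields the filterMap of the per-field entries
theorem pv_foldl_opt_insert_items {ν : Type} (g : (String × String) → Option ν) :
    ∀ (fields : List (String × String)) (d : PySem.Dict String ν),
      (fields.map Prod.fst).Nodup → (∀ p ∈ fields, d.contains p.1 = false) →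
      (fields.foldl (pvOptIns g) d).items
        = d.items ++ fields.filterMap (fun p => (g p).map (fun v => (p.1, v))) := by
  intro fields
  induction fields with
  | nil => intro d _ _; simp
  | cons p rest ih =>
    intro d hnd hfresh
    rw [List.map_cons] at hnd
    have hpn : p.1 ∉ rest.map Prod.fst := (List.nodup_cons.mp hnd).1
    have hnd' : (rest.map Prod.fst).Nodup := (List.nodup_cons.mp hnd).2
    simp only [List.foldl_cons, List.filterMap_cons]
    rcases hg : g p with _ | v
    · rw [show pvOptIns g d p = d by unfold pvOptIns; rw [hg]]
      rw [ih d hnd' (fun q hq => hfresh q (List.mem_cons_of_mem _ hq))]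
      simp
    · rw [show pvOptIns g d p = d.insert p.1 v by unfold pvOptIns; rw [hg]]
      have hdp : d.contains p.1 = false := hfresh p List.mem_cons_self
      rw [ih (d.insert p.1 v) hnd' ?_]
      · rw [PySem.Dict.items_insert_of_not_contains _ _ hdp]
        simp
      · intro q hq
        have hne : q.1 ≠ p.1 := by
          intro h; exact hpn (h ▸ List.mem_map_of_mem hq)
        rw [PySem.Dict.contains_insert]
        simp [hne, hfresh q (List.mem_cons_of_mem _ hq)]

-- B-side, one field of one attachment's pass
theorem pv_step_get (sub a : List (String × String))
    (found : PySem.Dict String (List (String × String))) (p : String × String) (k : String) :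
    (if found.contains p.1 then found
     else
       match (PySem.Dict.mk a).get? "filename" with
       | none => found
       | some fn =>
         if fn = "" then found
         else if (PySem.Dict.mk sub).get? p.1 == some fn then found.insert p.1 a
         else found).get? k
    = if k = p.1 ∧ found.get? k = none ∧ pvMatch sub a k then some a else found.get? k := by
  by_cases hc : found.contains p.1
  · have hsome : found.get? p.1 ≠ none := by
      rw [PySem.Dict.contains_eq_isSome_get?] at hc
      intro h; rw [h] at hc; simp at hc
    rw [if_pos hc, if_neg]
    rintro ⟨hk, hn, _⟩; exact hsome (hk ▸ hn)
  · have hc' : found.contains p.1 = false := by simpa using hc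
    simp only [hc', Bool.false_eq_true, if_false]
    rcases hfn : (PySem.Dict.mk a).get? "filename" with _ | fn
    · simp [pvMatch, hfn]
    · simp only [pvMatch, hfn]
      by_cases hfe : fn = ""
      · simp [hfe]
      · have hfe' : (fn == "") = false := by simpa using hfe
        simp only [if_neg hfe, hfe', Bool.not_false, Bool.true_and]
        by_cases heq : ((PySem.Dict.mk sub).get? p.1 == some fn) = true
        · simp only [heq, if_true]
          rw [PySem.Dict.get?_insert]
          by_cases hk : k = p.1
          · have heq2 : (PySem.Dict.mk sub).get? p.1 = some fn := eq_of_beq heq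
            have hfnone : found.get? p.1 = none := by
              rw [PySem.Dict.contains_eq_isSome_get?] at hc'
              rcases h : found.get? p.1 with _ | v
              · rfl
              · rw [h] at hc'; simp at hc'
            simp [hk, hfnone, heq2]
          · simp [hk]
        · have heq' : ((PySem.Dict.mk sub).get? p.1 == some fn) = false := by simpa using heq
          simp only [heq', Bool.false_eq_true, if_false]
          rw [if_neg]
          rintro ⟨hk, _, hm⟩
          rw [hk] at hm
          rw [heq'] at hm
          simp at hm

-- B-side: one attachment's whole inner pass over the fields
theorem pv_inner_get (sub a : List (String × String)) :
    ∀ (fields : List (String × String)), (fields.map Prod.fst).Nodup →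
    ∀ (found : PySem.Dict String (List (String × String))) (k : String),
      (fields.foldl (fun found p =>
        if found.contains p.1 then found
        else
          match (PySem.Dict.mk a).get? "filename" with
          | none => found
          | some fn =>
            if fn = "" then found
            else if (PySem.Dict.mk sub).get? p.1 == some fn then found.insert p.1 a
            else found) found).get? k
      = if k ∈ fields.map Prod.fst ∧ found.get? k = none ∧ pvMatch sub a k
        then some a else found.get? k := by
  intro fields
  induction fields with
  | nil => intro _ found k; simp
  | cons p rest ih =>
    intro hnd found k
    rw [List.map_cons] at hnd
    have hpn : p.1 ∉ rest.map Prod.fst := (List.nodup_cons.mp hnd).1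
    have hnd' : (rest.map Prod.fst).Nodup := (List.nodup_cons.mp hnd).2
    simp only [List.foldl_cons]
    rw [ih hnd']
    rw [pv_step_get]
    by_cases hk : k = p.1
    · have hr : k ∉ rest.map Prod.fst := hk ▸ hpn
      rw [if_neg (show ¬(k ∈ rest.map Prod.fst ∧
            (if k = p.1 ∧ found.get? k = none ∧ pvMatch sub a k = true then some a else found.get? k) = none ∧
            pvMatch sub a k = true) from fun h => hr h.1)]
      simp [hk, List.mem_cons]
    · rw [show (if k = p.1 ∧ found.get? k = none ∧ pvMatch sub a k = true then some a else found.get? k)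
            = found.get? k from if_neg (fun h => hk h.1)]
      by_cases hr : k ∈ rest.map Prod.fst
      · by_cases hc2 : found.get? k = none ∧ pvMatch sub a k = true
        · rw [if_pos ⟨hr, hc2.1, hc2.2⟩, if_pos ⟨List.mem_cons_of_mem _ hr, hc2.1, hc2.2⟩]
        · rw [if_neg (fun h => hc2 ⟨h.2.1, h.2.2⟩), if_neg (fun h => hc2 ⟨h.2.1, h.2.2⟩)]
      · rw [if_neg (fun h => hr h.1),
            if_neg (fun h => (List.mem_cons.mp h.1).elim hk (fun h1 => hr h1))]

-- B-side: the whole sweep computes per-field the first matching attachment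
theorem pv_found_get (submission_data : List (String × String)) (k : String)
    (hk : k ∈ pvFields.map Prod.fst) :
    ∀ (attachments : List (List (String × String))) (found : PySem.Dict String (List (String × String))),
      (attachments.foldl (fun found a =>
        pvFields.foldl (fun found p =>
          if found.contains p.1 then found
          else
            match (PySem.Dict.mk a).get? "filename" with
            | none => found
            | some fn =>
              if fn = "" then found
              else if (PySem.Dict.mk submission_data).get? p.1 == some fn then found.insert p.1 a
              else found) found) found).get? k
      = (found.get? k).or
          (match (PySem.Dict.mk submission_data).get? k with
           | none => none
           | some f =>
             if f = "" then none
             else attachments.find? (fun a => (PySem.Dict.mk a).get? "filename" == some f)) := by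
  have hndf : (pvFields.map Prod.fst).Nodup := by decide
  intro attachments
  induction attachments with
  | nil =>
    intro found
    rcases h : (PySem.Dict.mk submission_data).get? k with _ | f
    · simp
    · simp only [List.find?_nil]
      split_ifs <;> simp
  | cons a rest ih =>
    intro found
    simp only [List.foldl_cons]
    rw [ih, pv_inner_get submission_data a pvFields hndf found k]
    rcases hs : (PySem.Dict.mk submission_data).get? k with _ | f
    · have hm : pvMatch submission_data a k = false := by
        unfold pvMatch
        rcases hfn : (PySem.Dict.mk a).get? "filename" with _ | fn
        · rfl
        · rw [hs]; simp
      simp [hm]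
    · by_cases hfe : f = ""
      · have hm : pvMatch submission_data a k = false := by
          unfold pvMatch
          rcases hfn : (PySem.Dict.mk a).get? "filename" with _ | fn
          · rfl
          · rw [hs, hfe]
            by_cases h : fn = "" <;> simp [h]
        simp [hm, hfe]
      · -- pvMatch coincides with A's find? predicate at this field
        have hmp : pvMatch submission_data a k
            = ((PySem.Dict.mk a).get? "filename" == some f) := by
          unfold pvMatch
          rcases hfn : (PySem.Dict.mk a).get? "filename" with _ | fn
          · simp
          · rw [hs]
            by_cases h : fn = ""
            · simp [h, Ne.symm hfe]
            · have h' : (fn == "") = false := by simpa using h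
              by_cases hff : fn = f
              · subst hff; simp [h']
              · have h1 : (fn == f) = false := by simpa using hff
                have h2 : (f == fn) = false := by simpa using (Ne.symm hff)
                simp [h', h1, h2]
        simp only [if_neg hfe]
        by_cases hpa : ((PySem.Dict.mk a).get? "filename" == some f) = true
        · have hfind : List.find? (fun x => (PySem.Dict.mk x).get? "filename" == some f) (a :: rest)
              = some a := by simp [hpa]
          rw [hfind]
          by_cases hfd : found.get? k = none
          · rw [if_pos ⟨hk, hfd, by rw [hmp]; exact hpa⟩]
            simp [hfd]
          · rw [if_neg (by rintro ⟨_, h, _⟩; exact hfd h)]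
            rcases h : found.get? k with _ | v
            · exact absurd h hfd
            · simp
        · have hpa' : ((PySem.Dict.mk a).get? "filename" == some f) = false := by simpa using hpa
          have hfind : List.find? (fun x => (PySem.Dict.mk x).get? "filename" == some f) (a :: rest)
              = List.find? (fun x => (PySem.Dict.mk x).get? "filename" == some f) rest := by
            simp [hpa']
          rw [hfind]
          rw [if_neg]
          rintro ⟨_, _, hm⟩
          rw [hmp, hpa'] at hm
          exact absurd hm (by simp)

-- pointwise-equal steps give equal folds
theorem pv_foldl_ext {α β : Type} (f g : β → α → β) (h : ∀ b a, f b a = g b a) :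
    ∀ (l : List α) (init : β), l.foldl f init = l.foldl g init := by
  intro l
  induction l with
  | nil => intro init; rfl
  | cons x xs ih => intro init; simp only [List.foldl_cons, h, ih]

-- ===== VERDICT =====
theorem map_photos_to_components_py_spec : Claim_equal_map_photos_to_components_py := by
  intro attachments submission_data _ _
  unfold Spec_map_photos_to_components_py
  unfold map_photos_to_components_py map_photos_to_components_py_alt
  -- A's fold step is the optional insert of pvEntryA
  rw [pv_foldl_ext _ (pvOptIns (pvEntryA attachments submission_data)) ?hstep]
  · apply Eq.trans (pv_foldl_opt_insert_items (pvEntryA attachments submission_data) pvFields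
        (PySem.Dict.mk []) (by decide) (by decide))
    show List.filterMap (fun p => (pvEntryA attachments submission_data p).map (fun v => (p.1, v))) pvFields
        = List.filterMap (fun p =>
            match ((attachments.foldl (fun found a =>
              pvFields.foldl (fun found p =>
                if found.contains p.1 then found
                else
                  match (PySem.Dict.mk a).get? "filename" with
                  | none => found
                  | some fn =>
                    if fn = "" then found
                    else if (PySem.Dict.mk submission_data).get? p.1 == some fn then found.insert p.1 a
                    else found) found) (PySem.Dict.mk ([] : List (String × List (String × String))))).get? p.1) with
            | none => none
            | some a =>
              some (p.1, [("component_type", p.2), ("download_url", pvUrl a),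
                          ("filename", ((PySem.Dict.mk submission_data).get? p.1).getD "")])) pvFields
    apply List.filterMap_congr
    intro p hp
    have hk : p.1 ∈ pvFields.map Prod.fst := List.mem_map_of_mem hp
    rw [pv_found_get submission_data p.1 hk attachments (PySem.Dict.mk [])]
    unfold pvEntryA
    rcases hs : (PySem.Dict.mk submission_data).get? p.1 with _ | f
    · simp [PySem.Dict.get?]
    · by_cases hfe : f = ""
      · simp [hfe, PySem.Dict.get?]
      · simp only [if_neg hfe]
        rcases hf : attachments.find? (fun a => (PySem.Dict.mk a).get? "filename" == some f) with _ | a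
        · simp [PySem.Dict.get?]
        · simp [PySem.Dict.get?]
  · intro acc p
    unfold pvOptIns pvEntryA
    rcases (PySem.Dict.mk submission_data).get? p.1 with _ | f
    · rfl
    · simp only
      by_cases hfe : f = ""
      · simp [hfe]
      · simp only [if_neg hfe]
        rcases attachments.find? (fun a => (PySem.Dict.mk a).get? "filename" == some f) with _ | a <;> rfl
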